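-- pv_equiv track=rewrite | github.com/noword/rlcard | rlcard/games/shanghaidoudizhu/gen_card.py | gen_patterns
-- ===== SOURCE A (Python) =====
-- def gen_patterns(s):
--     res = ''
--     last = s[0]
--     for c in s:
--         if c != last:
--             res += '.*'
--         res += c
--         last = c
--     return res
-- ===== SOURCE B (Python) =====
-- def gen_patterns(s):
--     # Divide and conquer: the pattern of s is the pattern of its left half,
--     # then '.*' if the characters at the cut differ, then the pattern of the right half.
--     if len(s) <= 1:
--         return s
--     m = len(s) // 2
--     sep = '' if s[m - 1] == s[m] else '.*'
--     return gen_patterns(s[:m]) + sep + gen_patterns(s[m:])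
-- ===== Notes on version B (the rewrite author's own statement) =====
-- stated objective: alternative
-- what changed: B computes the pattern by divide and conquer: it splits the string at the midpoint, recursively builds the pattern of each half, and concatenates them with '.*' inserted only when the characters adjacent to the cut differ, instead of A's left-to-right scan carrying a last-seen-character accumulator.
-- crash fix: On the empty string A raises IndexError (it reads s[0] before its loop); B returns the empty string. — e.g. on gen_patterns(""): A raises IndexError, B returns ""
import Mathlib
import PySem

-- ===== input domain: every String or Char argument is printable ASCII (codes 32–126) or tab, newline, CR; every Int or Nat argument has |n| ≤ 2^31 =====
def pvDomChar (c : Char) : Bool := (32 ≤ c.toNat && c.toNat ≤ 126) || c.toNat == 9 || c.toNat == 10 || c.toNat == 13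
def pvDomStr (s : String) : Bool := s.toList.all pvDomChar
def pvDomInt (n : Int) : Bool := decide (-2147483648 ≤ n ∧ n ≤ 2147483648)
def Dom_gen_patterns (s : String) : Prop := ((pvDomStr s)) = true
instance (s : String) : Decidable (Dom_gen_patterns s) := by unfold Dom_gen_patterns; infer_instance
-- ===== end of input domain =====

-- B builds the pattern by divide and conquer (split at the midpoint, recurse, insert '.*'
-- at the cut only when the adjacent characters differ) instead of A's left-to-right scan
-- with a last-seen accumulator (objective: alternative).
-- On the empty string A raises IndexError (s[0]); B returns '' (see Raises_ block).

-- ===== PORT A =====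
-- A: res = ''; last = s[0]; for c in s: if c != last: res += '.*'; res += c; last = c
def gen_patterns (s : String) : String :=
  match PySem.Str.pyGet? s 0 with
  | none => ""  -- s[0] raises IndexError here; outside Pre_
  | some l0 =>
    let st := s.toList.foldl
      (fun (p : List Char × Char) c =>
        ((if c ≠ p.2 then p.1 ++ ['.', '*'] else p.1) ++ [c], c))
      ([], l0)
    String.ofList st.1

-- ===== PORT B =====
-- B: if len(s) <= 1: return s; m = len(s)//2;
--    return gen_patterns(s[:m]) + ('' if s[m-1]==s[m] else '.*') + gen_patterns(s[m:])
-- (strings are carried as List Char; s[:m]/s[m:] with 0 ≤ m ≤ len are take/drop)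
def pvDC (l : List Char) : List Char :=
  if l.length ≤ 1 then l
  else
    pvDC (l.take (l.length / 2))
      ++ (if l[l.length / 2 - 1]? = l[l.length / 2]? then [] else ['.', '*'])
      ++ pvDC (l.drop (l.length / 2))
termination_by l.length
decreasing_by
  · simp only [List.length_take]; omega
  · simp only [List.length_drop]; omega

def gen_patterns_alt (s : String) : String := String.ofList (pvDC s.toList)

-- ===== PRECONDITION & SPEC =====
-- Pre_ excludes only the empty string, on which A raises IndexError at s[0].
def Pre_gen_patterns (s : String) : Prop := s ≠ ""
instance (s : String) : Decidable (Pre_gen_patterns s) := by unfold Pre_gen_patterns; infer_instance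
def pvWitness_gen_patterns : String := "aab"

-- On the empty string A raises IndexError (s[0] before the loop); B returns ''.
def Raises_gen_patterns (s : String) : Prop := s = ""
instance (s : String) : Decidable (Raises_gen_patterns s) := by unfold Raises_gen_patterns; infer_instance
def pvRaiseWitness_gen_patterns : String := ""
def pvRaiseWitnessOut_gen_patterns : String := ""

def Spec_gen_patterns (s : String) (out : String) : Prop := out = gen_patterns_alt s
instance (s : String) (out : String) : Decidable (Spec_gen_patterns s out) := by unfold Spec_gen_patterns; infer_instance

-- ===== CLAIM (what is proved, stated in full; the proofs are below) =====
def Claim_equal_gen_patterns : Prop := ∀ (s : String), Dom_gen_patterns s → Pre_gen_patterns s → Spec_gen_patterns s (gen_patterns s)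
def Claim_raises_gen_patterns : Prop := (∀ (s : String), Dom_gen_patterns s → Raises_gen_patterns s → ¬ Pre_gen_patterns s) ∧ (Dom_gen_patterns (pvRaiseWitness_gen_patterns) ∧ Raises_gen_patterns (pvRaiseWitness_gen_patterns) ∧ gen_patterns_alt (pvRaiseWitness_gen_patterns) = pvRaiseWitnessOut_gen_patterns)

-- ===== LEMMAS AND PROOFS =====

-- what A's scan emits after 'last', over the remaining characters
def pvG (last : Char) : List Char → List Char
  | [] => []
  | c :: cs => (if c ≠ last then ['.', '*'] else []) ++ [c] ++ pvG c cs

-- A's fold, unrolled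
lemma pvA_fold (cs : List Char) : ∀ (res : List Char) (last : Char),
    (cs.foldl (fun (p : List Char × Char) c =>
        ((if c ≠ p.2 then p.1 ++ ['.', '*'] else p.1) ++ [c], c)) (res, last)).1
      = res ++ pvG last cs := by
  induction cs with
  | nil => intro res last; simp [pvG]
  | cons c cs ih =>
    intro res last
    simp only [List.foldl_cons, ih, pvG]
    by_cases h : c = last <;> simp [h]

-- pvG splits at any cut, carrying the last character of the left piece
lemma pvG_append (xs ys : List Char) : ∀ (a : Char),
    pvG a (xs ++ ys) = pvG a xs ++ pvG (xs.getLastD a) ys := by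
  induction xs with
  | nil => intro a; simp [pvG]
  | cons x xs ih =>
    intro a
    simp only [List.cons_append, pvG, ih x, List.getLastD_cons, List.append_assoc]

-- the character at index k of c::cs is the last of the first k characters of cs after c
lemma pvIdx_lastD (cs : List Char) : ∀ (c : Char) (k : Nat), k ≤ cs.length →
    (c :: cs)[k]? = some ((cs.take k).getLastD c) := by
  induction cs with
  | nil =>
    intro c k hk
    have hk0 : k = 0 := Nat.le_zero.mp (by simpa using hk)
    subst hk0; simp
  | cons d ds ih =>
    intro c k hk
    cases k with
    | zero => simp
    | succ k =>
      have hk' : k ≤ ds.length := by simpa using hk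
      rw [show (c :: d :: ds)[k + 1]? = (d :: ds)[k]? from rfl, ih d k hk',
        List.take_succ_cons, List.getLastD_cons]

-- divide and conquer computes A's scan
lemma pvDC_spec : ∀ (n : Nat) (c : Char) (cs : List Char), cs.length ≤ n →
    pvDC (c :: cs) = c :: pvG c cs := by
  intro n
  induction n with
  | zero =>
    intro c cs h
    have : cs = [] := List.eq_nil_of_length_eq_zero (Nat.le_zero.mp h)
    subst this; simp [pvDC, pvG]
  | succ n ih =>
    intro c cs h
    cases hcs : cs with
    | nil => simp [pvDC, pvG]
    | cons d ds =>
      subst hcs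
      rw [pvDC]
      have hlen : (c :: d :: ds).length = ds.length + 2 := by simp
      have hnot : ¬ (c :: d :: ds).length ≤ 1 := by omega
      rw [if_neg hnot]
      set L := (c :: d :: ds).length with hL
      rw [hlen] at hL
      have hm1 : 1 ≤ L / 2 := by omega
      have hm2 : L / 2 ≤ L - 1 := by omega
      obtain ⟨mm, hmm⟩ : ∃ mm, L / 2 = mm + 1 := ⟨L / 2 - 1, by omega⟩
      have hmmle : mm ≤ (d :: ds).length := by simp; omega
      have hmmlt : mm < (d :: ds).length := by simp; omega
      -- the two halves
      have htake : (c :: d :: ds).take (L / 2) = c :: (d :: ds).take mm := by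
        rw [hmm]; rfl
      have hdrop : (c :: d :: ds).drop (L / 2) = (d :: ds).drop mm := by
        rw [hmm]; rfl
      obtain ⟨e, es, hdr⟩ : ∃ e es, (d :: ds).drop mm = e :: es := by
        cases hx : (d :: ds).drop mm with
        | nil => exfalso; have := congrArg List.length hx; simp at this; omega
        | cons e es => exact ⟨e, es, rfl⟩
      -- recursive calls via the induction hypothesis
      have hlen_take : ((d :: ds).take mm).length ≤ n := by
        simp only [List.length_take]; simp at h ⊢; omega
      have hlen_drop : es.length ≤ n := by
        have := congrArg List.length hdr
        simp only [List.length_drop] at this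
        simp at this h ⊢; omega
      rw [htake, hdrop, hdr, ih c _ hlen_take, ih e es hlen_drop]
      -- the separator test: indices L/2-1 and L/2 of the whole string
      have hlast : (c :: d :: ds)[L / 2 - 1]? = some (((d :: ds).take mm).getLastD c) := by
        rw [hmm]; simpa using pvIdx_lastD (d :: ds) c mm hmmle
      have hmid : (c :: d :: ds)[L / 2]? = some e := by
        have : (c :: d :: ds)[L / 2]? = ((c :: d :: ds).drop (L / 2))[0]? := by
          simp [List.getElem?_drop]
        rw [this, hdrop, hdr]; simp
      rw [hlast, hmid]
      -- A's side: split the scan at the same cut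
      have hsplit : d :: ds = (d :: ds).take mm ++ e :: es := by
        rw [← hdr, List.take_append_drop]
      conv_rhs => rw [hsplit]
      rw [pvG_append]
      set a := ((d :: ds).take mm).getLastD c
      simp only [pvG]
      by_cases he : e = a
      · simp [he]
      · have : ¬ (some a = some e) := by simpa using fun hx => he hx.symm
        simp [he, this]

-- ===== VERDICT (by name: the statement is the Claim_ definition above) =====
theorem gen_patterns_raises : Claim_raises_gen_patterns := by
  unfold Claim_raises_gen_patterns
  refine ⟨fun s _ h => ?_, by decide, by decide, ?_⟩
  · simp [Raises_gen_patterns] at h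
    simp [Pre_gen_patterns, h]
  · show String.ofList (pvDC ("" : String).toList) = ""
    simp [pvDC]

theorem gen_patterns_spec : Claim_equal_gen_patterns := by
  intro s hdom hpre
  unfold Spec_gen_patterns gen_patterns gen_patterns_alt
  cases h : s.toList with
  | nil =>
    exact absurd hpre ((gen_patterns_raises).1 s hdom (by simpa using congrArg String.ofList h))
  | cons c0 cs =>
    have hA : PySem.Str.pyGet? s 0 = some c0 := by simp [PySem.Str.pyGet?, h]
    simp only [hA]
    rw [pvA_fold, pvDC_spec cs.length c0 cs le_rfl]
    simp [pvG]
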